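-- pv_equiv track=rewrite | github.com/KarolKita/projektESI_1 | drzewkoBinarne/main.py | podzial_tab
-- ===== SOURCE A (Python) =====
-- def podzial_tab(tab, przes_p, atr_p):
--     tab_tak = {}  # tablica z danymi potwierdzajacymi warunek
--     tab_nie = {}  # tablica z danymi zaprzeczajacymi warunek
--
--     # wczytywanie przeslanek i atrybutow do tabel
--     for przes in tab:
--         tab_tak[przes] = {}
--         tab_nie[przes] = {}
--         for atr in tab[przes]:
--             tab_tak[przes][atr] = []
--             tab_nie[przes][atr] = []
--
--     nr_kol = 0  # numer kolumny
--
--     # wczytanie przypadkow do tablic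
--     for przyp_p in tab[przes_p][atr_p]:
--         for przes in tab:
--             for atr in tab[przes]:
--                 if przyp_p == 1:
--                     # tablica z elementami potwierdzajacymi
--                     tab_tak[przes][atr].append(tab[przes][atr][nr_kol])
--                 else:
--                     # tablica z elementami zaprzeczajacymi
--                     tab_nie[przes][atr].append(tab[przes][atr][nr_kol])
--         nr_kol += 1  # zwiekszanie numeru kolumny
--
--     # zwrocenie tablicy z potwierdzajacych i zaprzeeczajacych warunek
--     return tab_tak, tab_nie
-- ===== SOURCE B (Python) =====
-- def podzial_tab(tab, przes_p, atr_p):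
--     # partition column indices once by the reference row, then gather per attribute
--     ref = tab[przes_p][atr_p]
--     tak_idx = [i for i, v in enumerate(ref) if v == 1]
--     nie_idx = [i for i, v in enumerate(ref) if v != 1]
--     tab_tak = {przes: {atr: [col[i] for i in tak_idx] for atr, col in m.items()}
--                for przes, m in tab.items()}
--     tab_nie = {przes: {atr: [col[i] for i in nie_idx] for atr, col in m.items()}
--                for przes, m in tab.items()}
--     return tab_tak, tab_nie
-- ===== Notes on version B (the rewrite author's own statement) =====
-- stated objective: simpler
-- what changed: Instead of A's column-by-column triple loop that appends one cell at a time into pre-built nested dicts, B partitions the column indices by the reference row once and then builds each output table in one attribute-major pass, gathering each attribute's cells by the precomputed index lists.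
import Mathlib
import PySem

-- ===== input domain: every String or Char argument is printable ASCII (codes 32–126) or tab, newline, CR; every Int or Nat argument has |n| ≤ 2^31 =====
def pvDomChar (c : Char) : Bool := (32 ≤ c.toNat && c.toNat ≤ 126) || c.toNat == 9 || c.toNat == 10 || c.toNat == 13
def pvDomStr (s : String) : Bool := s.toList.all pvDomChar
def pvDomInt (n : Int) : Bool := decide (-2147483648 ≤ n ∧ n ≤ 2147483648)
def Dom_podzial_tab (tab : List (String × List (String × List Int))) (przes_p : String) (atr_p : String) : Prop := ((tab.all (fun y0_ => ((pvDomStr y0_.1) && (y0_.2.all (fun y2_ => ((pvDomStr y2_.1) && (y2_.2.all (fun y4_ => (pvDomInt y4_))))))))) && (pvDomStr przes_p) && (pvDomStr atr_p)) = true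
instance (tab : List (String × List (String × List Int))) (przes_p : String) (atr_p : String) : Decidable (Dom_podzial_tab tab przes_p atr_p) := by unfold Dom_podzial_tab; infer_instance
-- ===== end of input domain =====

-- B replaces A's cell-by-cell triple loop with a one-shot index partition of the reference row
-- followed by an attribute-major gather (objective: simpler). Equivalence is about return values.

-- ===== PORT A =====
-- literal transliteration of A: build empty nested dicts, then for each column number append
-- each cell into the "tak" or "nie" table depending on the reference value; dict reads are
-- first-match lookups (PySem.Dict over the association lists), xs[i] is pyGetD (in range on Pre_).
def podzial_tab (tab : List (String × List (String × List Int))) (przes_p : String) (atr_p : String) : (List (String × List (String × List Int))) × (List (String × List (String × List Int))) :=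
  -- tab_tak = {}; tab_nie = {}; skeleton loop
  let skel : PySem.Dict String (PySem.Dict String (List Int)) × PySem.Dict String (PySem.Dict String (List Int)) :=
    tab.foldl (fun acc pr =>
      let acc1 := (acc.1.insert pr.1 PySem.Dict.empty, acc.2.insert pr.1 PySem.Dict.empty)
      ((PySem.Dict.mk tab).getD pr.1 []).foldl (fun acc2 ar =>
          (acc2.1.modify pr.1 PySem.Dict.empty (fun d => d.insert ar.1 ([] : List Int)),
           acc2.2.modify pr.1 PySem.Dict.empty (fun d => d.insert ar.1 ([] : List Int)))) acc1)
      (PySem.Dict.empty, PySem.Dict.empty)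
  -- for przyp_p in tab[przes_p][atr_p], with nr_kol counting up
  let ref : List Int := (PySem.Dict.mk ((PySem.Dict.mk tab).getD przes_p [])).getD atr_p []
  let fin := (PySem.List.enumerate ref).foldl (fun acc ke =>
      tab.foldl (fun acc2 pr =>
        ((PySem.Dict.mk tab).getD pr.1 []).foldl (fun acc3 ar =>
          let x := PySem.List.pyGetD ((PySem.Dict.mk ((PySem.Dict.mk tab).getD pr.1 [])).getD ar.1 []) ke.1 0
          if ke.2 == 1 then
            (acc3.1.modify pr.1 PySem.Dict.empty (fun d => d.modify ar.1 [] (fun l => l ++ [x])), acc3.2)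
          else
            (acc3.1, acc3.2.modify pr.1 PySem.Dict.empty (fun d => d.modify ar.1 [] (fun l => l ++ [x])))) acc2) acc) skel
  (fin.1.items.map (fun p => (p.1, p.2.items)), fin.2.items.map (fun p => (p.1, p.2.items)))

-- ===== PORT B =====
-- literal transliteration of B: partition the column indices by the reference row once,
-- then gather per attribute.
def podzial_tab_alt (tab : List (String × List (String × List Int))) (przes_p : String) (atr_p : String) : (List (String × List (String × List Int))) × (List (String × List (String × List Int))) :=
  let ref : List Int := (PySem.Dict.mk ((PySem.Dict.mk tab).getD przes_p [])).getD atr_p []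
  let tak_idx := ((PySem.List.enumerate ref).filter (fun p => p.2 == 1)).map (fun p => p.1)
  let nie_idx := ((PySem.List.enumerate ref).filter (fun p => !(p.2 == 1))).map (fun p => p.1)
  (tab.map (fun pr => (pr.1, pr.2.map (fun ar => (ar.1, tak_idx.map (fun i => PySem.List.pyGetD ar.2 i 0))))),
   tab.map (fun pr => (pr.1, pr.2.map (fun ar => (ar.1, nie_idx.map (fun i => PySem.List.pyGetD ar.2 i 0))))))

-- ===== PRECONDITION & SPEC =====
-- Pre_ excludes exactly: inputs where A raises (KeyError: przes_p/atr_p missing; IndexError: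
-- some column shorter than the reference row) and association lists with duplicate keys at
-- either level, which cannot arise from a Python dict.
def Pre_podzial_tab (tab : List (String × List (String × List Int))) (przes_p : String) (atr_p : String) : Prop :=
  (tab.map Prod.fst).Nodup ∧
  (∀ pr ∈ tab, (pr.2.map Prod.fst).Nodup) ∧
  ((PySem.Dict.mk tab).contains przes_p = true) ∧
  ((PySem.Dict.mk ((PySem.Dict.mk tab).getD przes_p [])).contains atr_p = true) ∧
  (∀ pr ∈ tab, ∀ ar ∈ pr.2,
    ((PySem.Dict.mk ((PySem.Dict.mk tab).getD przes_p [])).getD atr_p []).length ≤ ar.2.length)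
instance (tab : List (String × List (String × List Int))) (przes_p : String) (atr_p : String) : Decidable (Pre_podzial_tab tab przes_p atr_p) := by unfold Pre_podzial_tab; infer_instance

def pvWitness_podzial_tab : (List (String × List (String × List Int))) × String × String :=
  ([("p", [("a", [1, 0]), ("b", [5, 6])]), ("q", [("c", [7, 8])])], "p", "a")

def Spec_podzial_tab (tab : List (String × List (String × List Int))) (przes_p : String) (atr_p : String) (out : (List (String × List (String × List Int))) × (List (String × List (String × List Int)))) : Prop := out = podzial_tab_alt tab przes_p atr_p
instance (tab : List (String × List (String × List Int))) (przes_p : String) (atr_p : String) (out : (List (String × List (String × List Int))) × (List (String × List (String × List Int)))) : Decidable (Spec_podzial_tab tab przes_p atr_p out) := by unfold Spec_podzial_tab; exact instDecidableEqProd out (podzial_tab_alt tab przes_p atr_p)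

-- ===== CLAIM (what is proved, stated in full; the proofs are below) =====
def Claim_equal_podzial_tab : Prop := ∀ (tab : List (String × List (String × List Int))) (przes_p : String) (atr_p : String), Dom_podzial_tab tab przes_p atr_p → Pre_podzial_tab tab przes_p atr_p → Spec_podzial_tab tab przes_p atr_p (podzial_tab tab przes_p atr_p)

-- ===== LEMMAS AND PROOFS =====

-- one row of the nested state: attribute dict of pr with every column transformed by F
def pvRow (F : List Int → List Int) (pr : String × List (String × List Int)) : String × PySem.Dict String (List Int) :=
  (pr.1, PySem.Dict.mk (pr.2.map (fun ar => (ar.1, F ar.2))))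

-- the whole nested state with every column transformed by F
def pvState (tab : List (String × List (String × List Int))) (F : List Int → List Int) : PySem.Dict String (PySem.Dict String (List Int)) :=
  PySem.Dict.mk (tab.map (pvRow F))

-- get? of a mk-dict at the (unique) key in the middle
theorem pv_get?_mk_mid {ν : Type} (xs ys : List (String × ν)) (k : String) (v : ν)
    (hx : ∀ p ∈ xs, p.1 ≠ k) :
    (PySem.Dict.mk (xs ++ (k, v) :: ys)).get? k = some v := by
  induction xs with
  | nil => simp [PySem.Dict.get?_mk_cons]
  | cons p xs ih =>
    rw [List.cons_append, PySem.Dict.get?_mk_cons]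
    have hp : p.1 ≠ k := hx p (by simp)
    simp only [beq_iff_eq, if_neg hp]
    exact ih (fun q hq => hx q (by simp [hq]))

-- insert at the (unique) key in the middle rewrites that entry in place
theorem pv_insert_mid {ν : Type} (xs ys : List (String × ν)) (k : String) (v w : ν)
    (hx : ∀ p ∈ xs, p.1 ≠ k) (hy : ∀ p ∈ ys, p.1 ≠ k) :
    (PySem.Dict.mk (xs ++ (k, v) :: ys)).insert k w = PySem.Dict.mk (xs ++ (k, w) :: ys) := by
  apply PySem.Dict.ext
  have hc : (PySem.Dict.mk (xs ++ (k, v) :: ys)).contains k = true := by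
    simp [PySem.Dict.contains_mk, List.any_append]
  rw [PySem.Dict.items_insert_of_contains _ _ hc]
  show List.map _ (xs ++ (k, v) :: ys) = xs ++ (k, w) :: ys
  rw [List.map_append, List.map_cons]
  congr 1
  · conv_rhs => rw [← List.map_id xs]
    exact List.map_congr_left (fun p hp => by simp [hx p hp])
  · congr 1
    · simp
    · conv_rhs => rw [← List.map_id ys]
      exact List.map_congr_left (fun p hp => by simp [hy p hp])

-- modify at the (unique) key in the middle applies f to that entry in place
theorem pv_modify_mid {ν : Type} (xs ys : List (String × ν)) (k : String) (v d0 : ν) (f : ν → ν)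
    (hx : ∀ p ∈ xs, p.1 ≠ k) (hy : ∀ p ∈ ys, p.1 ≠ k) :
    (PySem.Dict.mk (xs ++ (k, v) :: ys)).modify k d0 f = PySem.Dict.mk (xs ++ (k, f v) :: ys) := by
  have hg : (PySem.Dict.mk (xs ++ (k, v) :: ys)).getD k d0 = v := by
    rw [PySem.Dict.getD_eq_get?_getD, pv_get?_mk_mid xs ys k v hx]; rfl
  show (PySem.Dict.mk (xs ++ (k, v) :: ys)).insert k (f ((PySem.Dict.mk (xs ++ (k, v) :: ys)).getD k d0)) = _
  rw [hg]
  exact pv_insert_mid xs ys k v (f v) hx hy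

-- a fold of modifies at one fixed key k collapses to one in-place update at k
theorem pv_foldl_modify_fix {β : Type} (h : β → PySem.Dict String (List Int) → PySem.Dict String (List Int))
    (l : List β) :
    ∀ (xs ys : List (String × PySem.Dict String (List Int))) (k : String) (dcur : PySem.Dict String (List Int)),
    (∀ p ∈ xs, p.1 ≠ k) → (∀ p ∈ ys, p.1 ≠ k) →
    l.foldl (fun acc b => acc.modify k PySem.Dict.empty (h b)) (PySem.Dict.mk (xs ++ (k, dcur) :: ys))
      = PySem.Dict.mk (xs ++ (k, l.foldl (fun d b => h b d) dcur) :: ys) := by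
  induction l with
  | nil => intro xs ys k dcur hx hy; rfl
  | cons b l ih =>
    intro xs ys k dcur hx hy
    rw [List.foldl_cons, pv_modify_mid xs ys k dcur PySem.Dict.empty (h b) hx hy]
    exact ih xs ys k (h b dcur) hx hy

-- a fold of modify-append over the inner dict's own items rewrites every entry in place
theorem pv_inner_fold (F : List Int → List Int) (G : List Int → Int)
    (l : List (String × List Int)) :
    ∀ (pre : List (String × List Int)),
    ((pre ++ l).map Prod.fst).Nodup →
    l.foldl (fun d ar => d.modify ar.1 ([] : List Int) (fun v => v ++ [G ar.2]))
      (PySem.Dict.mk (pre.map (fun ar => (ar.1, F ar.2 ++ [G ar.2])) ++ l.map (fun ar => (ar.1, F ar.2))))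
      = PySem.Dict.mk ((pre ++ l).map (fun ar => (ar.1, F ar.2 ++ [G ar.2]))) := by
  induction l with
  | nil => intro pre hnd; simp
  | cons a l ih =>
    intro pre hnd
    have hka : a.1 ∉ (pre.map Prod.fst) ∧ a.1 ∉ (l.map Prod.fst) := by
      rw [List.map_append, List.map_cons, List.nodup_append] at hnd
      exact ⟨fun hmem => hnd.2.2 a.1 hmem a.1 (by simp) rfl, (List.nodup_cons.mp hnd.2.1).1⟩
    have hx : ∀ p ∈ pre.map (fun ar => (ar.1, F ar.2 ++ [G ar.2])), p.1 ≠ a.1 := by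
      intro p hp
      obtain ⟨q, hq, rfl⟩ := List.mem_map.1 hp
      exact fun h => hka.1 (List.mem_map.2 ⟨q, hq, h⟩)
    have hy : ∀ p ∈ l.map (fun ar => (ar.1, F ar.2)), p.1 ≠ a.1 := by
      intro p hp
      obtain ⟨q, hq, rfl⟩ := List.mem_map.1 hp
      exact fun h => hka.2 (List.mem_map.2 ⟨q, hq, h⟩)
    rw [List.map_cons, List.foldl_cons,
        pv_modify_mid (pre.map (fun ar => (ar.1, F ar.2 ++ [G ar.2]))) (l.map (fun ar => (ar.1, F ar.2))) a.1 (F a.2) ([] : List Int) (fun v => v ++ [G a.2]) hx hy]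
    have hre : pre.map (fun ar => (ar.1, F ar.2 ++ [G ar.2])) ++ (a.1, F a.2 ++ [G a.2]) :: l.map (fun ar => (ar.1, F ar.2))
        = (pre ++ [a]).map (fun ar => (ar.1, F ar.2 ++ [G ar.2])) ++ l.map (fun ar => (ar.1, F ar.2)) := by
      simp
    rw [hre, ih (pre ++ [a]) (by simpa using hnd)]
    simp

-- key facts from Nodup of the combined key list
theorem pv_split_nodup (pre l : List (String × List (String × List Int))) (a : String × List (String × List Int))
    (hnd : ((pre ++ a :: l).map Prod.fst).Nodup) :
    (a.1 ∉ pre.map Prod.fst) ∧ (a.1 ∉ l.map Prod.fst) ∧ (((pre ++ [a]) ++ l).map Prod.fst).Nodup := by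
  refine ⟨?_, ?_, by simpa using hnd⟩
  · rw [List.map_append, List.map_cons, List.nodup_append] at hnd
    exact fun hmem => hnd.2.2 a.1 hmem a.1 (by simp) rfl
  · rw [List.map_append, List.map_cons, List.nodup_append] at hnd
    exact (List.nodup_cons.mp hnd.2.1).1

theorem pv_notmem_keys_row (F : List Int → List Int) (pre : List (String × List (String × List Int))) (k : String)
    (h : k ∉ pre.map Prod.fst) (p : String × PySem.Dict String (List Int)) (hp : p ∈ pre.map (pvRow F)) : p.1 ≠ k := by
  obtain ⟨q, hq, rfl⟩ := List.mem_map.1 hp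
  exact fun he => h (List.mem_map.2 ⟨q, hq, he⟩)

-- one-sided skeleton loop, generalized over the processed prefix
theorem pv_skel_aux (tab : List (String × List (String × List Int))) (l : List (String × List (String × List Int))) :
    ∀ (pre : List (String × List (String × List Int))),
    ((pre ++ l).map Prod.fst).Nodup →
    (∀ pr ∈ l, (PySem.Dict.mk tab).getD pr.1 [] = pr.2) →
    (∀ pr ∈ l, (pr.2.map Prod.fst).Nodup) →
    l.foldl (fun acc1 pr => ((PySem.Dict.mk tab).getD pr.1 []).foldl
        (fun d ar => d.modify pr.1 PySem.Dict.empty (fun dd => dd.insert ar.1 ([] : List Int)))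
        (acc1.insert pr.1 PySem.Dict.empty))
      (PySem.Dict.mk (pre.map (pvRow (fun _ => []))))
      = PySem.Dict.mk ((pre ++ l).map (pvRow (fun _ => []))) := by
  induction l with
  | nil => intro pre hnd _ _; simp
  | cons a l ih =>
    intro pre hnd hl hin
    obtain ⟨hka, hkl, hnd'⟩ := pv_split_nodup pre l a hnd
    rw [List.foldl_cons, hl a (by simp)]
    have hcon : (PySem.Dict.mk (pre.map (pvRow (fun _ => [])))).contains a.1 = false := by
      rw [PySem.Dict.contains_mk]
      simp only [List.any_eq_false]
      intro p hp
      simpa using pv_notmem_keys_row _ pre a.1 hka p hp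
    have hins := PySem.Dict.items_insert_of_not_contains (PySem.Dict.mk (pre.map (pvRow (fun _ => [])))) PySem.Dict.empty hcon
    have hinsd : (PySem.Dict.mk (pre.map (pvRow (fun _ => [])))).insert a.1 PySem.Dict.empty
        = PySem.Dict.mk (pre.map (pvRow (fun _ => [])) ++ [(a.1, PySem.Dict.empty)]) := PySem.Dict.ext hins
    rw [hinsd]
    have hfix := pv_foldl_modify_fix (fun ar dd => dd.insert ar.1 ([] : List Int)) a.2
      (pre.map (pvRow (fun _ => []))) [] a.1 PySem.Dict.empty
      (pv_notmem_keys_row _ pre a.1 hka) (by simp)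
    rw [show pre.map (pvRow (fun _ => [])) ++ [(a.1, PySem.Dict.empty)]
          = pre.map (pvRow (fun _ => [])) ++ (a.1, PySem.Dict.empty) :: [] from rfl, hfix]
    have hemp : a.2.foldl (fun d ar => d.insert ar.1 ([] : List Int)) PySem.Dict.empty
        = PySem.Dict.mk (a.2.map (fun ar => (ar.1, ([] : List Int)))) := by
      apply PySem.Dict.ext
      rw [PySem.Dict.items_foldl_insert_fresh a.2 (fun ar => ar.1) (fun _ => ([] : List Int)) PySem.Dict.empty
            (fun _ _ => rfl) (hin a (by simp))]
      rfl
    rw [hemp]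
    have hre : pre.map (pvRow (fun _ => [])) ++ (a.1, PySem.Dict.mk (a.2.map (fun ar => (ar.1, ([] : List Int))))) :: []
        = (pre ++ [a]).map (pvRow (fun _ => [])) := by simp [pvRow]
    rw [hre, ih (pre ++ [a]) hnd' (fun pr hpr => hl pr (by simp [hpr])) (fun pr hpr => hin pr (by simp [hpr]))]
    simp

-- the skeleton loop builds the all-empty nested state (both components)
theorem pv_skel (tab : List (String × List (String × List Int)))
    (hnd : (tab.map Prod.fst).Nodup) (hinner : ∀ pr ∈ tab, (pr.2.map Prod.fst).Nodup) :
    tab.foldl (fun acc pr =>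
      ((PySem.Dict.mk tab).getD pr.1 []).foldl (fun acc2 ar =>
          (acc2.1.modify pr.1 PySem.Dict.empty (fun d => d.insert ar.1 ([] : List Int)),
           acc2.2.modify pr.1 PySem.Dict.empty (fun d => d.insert ar.1 ([] : List Int))))
        (acc.1.insert pr.1 PySem.Dict.empty, acc.2.insert pr.1 PySem.Dict.empty))
      (PySem.Dict.empty, PySem.Dict.empty)
      = (pvState tab (fun _ => []), pvState tab (fun _ => [])) := by
  have hl : ∀ pr ∈ tab, (PySem.Dict.mk tab).getD pr.1 [] = pr.2 := by
    intro pr hpr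
    exact PySem.Dict.getD_of_mem_items _ (by simpa using hpr) (by simpa [PySem.Dict.keys_mk] using hnd) []
  have hfe : (fun (acc : PySem.Dict String (PySem.Dict String (List Int)) × PySem.Dict String (PySem.Dict String (List Int))) (pr : String × List (String × List Int)) =>
      ((PySem.Dict.mk tab).getD pr.1 []).foldl (fun acc2 ar =>
          (acc2.1.modify pr.1 PySem.Dict.empty (fun d => d.insert ar.1 ([] : List Int)),
           acc2.2.modify pr.1 PySem.Dict.empty (fun d => d.insert ar.1 ([] : List Int))))
        (acc.1.insert pr.1 PySem.Dict.empty, acc.2.insert pr.1 PySem.Dict.empty))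
      = (fun acc pr =>
          (((PySem.Dict.mk tab).getD pr.1 []).foldl
              (fun d ar => d.modify pr.1 PySem.Dict.empty (fun dd => dd.insert ar.1 ([] : List Int)))
              (acc.1.insert pr.1 PySem.Dict.empty),
           ((PySem.Dict.mk tab).getD pr.1 []).foldl
              (fun d ar => d.modify pr.1 PySem.Dict.empty (fun dd => dd.insert ar.1 ([] : List Int)))
              (acc.2.insert pr.1 PySem.Dict.empty))) := by
    funext acc pr
    show List.foldl _ (acc.1.insert pr.1 PySem.Dict.empty, acc.2.insert pr.1 PySem.Dict.empty) ((PySem.Dict.mk tab).getD pr.1 []) = _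
    exact PySem.List.foldl_prod_mk
      (fun (d : PySem.Dict String (PySem.Dict String (List Int))) (ar : String × List Int) => d.modify pr.1 PySem.Dict.empty (fun dd => dd.insert ar.1 ([] : List Int)))
      (fun (d : PySem.Dict String (PySem.Dict String (List Int))) (ar : String × List Int) => d.modify pr.1 PySem.Dict.empty (fun dd => dd.insert ar.1 ([] : List Int))) _ _ _
  rw [hfe, PySem.List.foldl_prod_mk
      (fun (a1 : PySem.Dict String (PySem.Dict String (List Int))) (pr : String × List (String × List Int)) => ((PySem.Dict.mk tab).getD pr.1 []).foldl
          (fun d ar => d.modify pr.1 PySem.Dict.empty (fun dd => dd.insert ar.1 ([] : List Int)))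
          (a1.insert pr.1 PySem.Dict.empty))
      (fun (a1 : PySem.Dict String (PySem.Dict String (List Int))) (pr : String × List (String × List Int)) => ((PySem.Dict.mk tab).getD pr.1 []).foldl
          (fun d ar => d.modify pr.1 PySem.Dict.empty (fun dd => dd.insert ar.1 ([] : List Int)))
          (a1.insert pr.1 PySem.Dict.empty))]
  have h0 : (PySem.Dict.empty : PySem.Dict String (PySem.Dict String (List Int)))
      = PySem.Dict.mk (([] : List (String × List (String × List Int))).map (pvRow (fun _ => []))) := rfl
  rw [h0, pv_skel_aux tab tab [] (by simpa using hnd) hl hinner]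
  rfl

-- one-sided main-loop pass, generalized over the processed prefix
theorem pv_round_aux (tab : List (String × List (String × List Int))) (nr : Int) (F : List Int → List Int)
    (l : List (String × List (String × List Int))) :
    ∀ (pre : List (String × List (String × List Int))),
    ((pre ++ l).map Prod.fst).Nodup →
    (∀ pr ∈ l, (PySem.Dict.mk tab).getD pr.1 [] = pr.2) →
    (∀ pr ∈ l, (pr.2.map Prod.fst).Nodup) →
    l.foldl (fun acc2 pr =>
        ((PySem.Dict.mk tab).getD pr.1 []).foldl (fun acc3 ar =>
          acc3.modify pr.1 PySem.Dict.empty (fun d => d.modify ar.1 []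
            (fun lst => lst ++ [PySem.List.pyGetD ((PySem.Dict.mk ((PySem.Dict.mk tab).getD pr.1 [])).getD ar.1 []) nr 0]))) acc2)
      (PySem.Dict.mk (pre.map (pvRow (fun col => F col ++ [PySem.List.pyGetD col nr 0])) ++ l.map (pvRow F)))
      = PySem.Dict.mk ((pre ++ l).map (pvRow (fun col => F col ++ [PySem.List.pyGetD col nr 0]))) := by
  induction l with
  | nil => intro pre hnd _ _; simp
  | cons a l ih =>
    intro pre hnd hl hin
    obtain ⟨hka, hkl, hnd'⟩ := pv_split_nodup pre l a hnd
    rw [List.foldl_cons, hl a (by simp)]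
    have hcg := PySem.List.foldl_congr_mem a.2
      (fun acc3 ar => acc3.modify a.1 PySem.Dict.empty (fun d => d.modify ar.1 []
          (fun lst => lst ++ [PySem.List.pyGetD ((PySem.Dict.mk a.2).getD ar.1 []) nr 0])))
      (fun acc3 ar => acc3.modify a.1 PySem.Dict.empty (fun d => d.modify ar.1 []
          (fun lst => lst ++ [PySem.List.pyGetD ar.2 nr 0])))
      (PySem.Dict.mk (pre.map (pvRow (fun col => F col ++ [PySem.List.pyGetD col nr 0])) ++ (a :: l).map (pvRow F)))
      (by
        intro acc ar har
        have hg := PySem.Dict.getD_of_mem_items (PySem.Dict.mk a.2) (k := ar.1) (v := ar.2) (by simpa using har) (by simpa [PySem.Dict.keys_mk] using hin a (by simp)) []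
        simp only []
        rw [hg])
    rw [hcg]
    have hfix := pv_foldl_modify_fix
      (fun (ar : String × List Int) (d : PySem.Dict String (List Int)) => d.modify ar.1 []
          (fun lst => lst ++ [PySem.List.pyGetD ar.2 nr 0])) a.2
      (pre.map (pvRow (fun col => F col ++ [PySem.List.pyGetD col nr 0]))) (l.map (pvRow F)) a.1
      (PySem.Dict.mk (a.2.map (fun ar => (ar.1, F ar.2))))
      (pv_notmem_keys_row _ pre a.1 hka) (pv_notmem_keys_row _ l a.1 hkl)
    rw [show pre.map (pvRow (fun col => F col ++ [PySem.List.pyGetD col nr 0])) ++ (a :: l).map (pvRow F)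
          = pre.map (pvRow (fun col => F col ++ [PySem.List.pyGetD col nr 0])) ++ (a.1, PySem.Dict.mk (a.2.map (fun ar => (ar.1, F ar.2)))) :: l.map (pvRow F) from rfl,
        hfix]
    have hinf := pv_inner_fold F (fun col => PySem.List.pyGetD col nr 0) a.2 []
      (by simpa using hin a (by simp))
    simp only [List.nil_append, List.map_nil] at hinf
    rw [hinf]
    have hre : pre.map (pvRow (fun col => F col ++ [PySem.List.pyGetD col nr 0])) ++ (a.1, PySem.Dict.mk (a.2.map (fun ar => (ar.1, F ar.2 ++ [PySem.List.pyGetD ar.2 nr 0])))) :: l.map (pvRow F)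
        = (pre ++ [a]).map (pvRow (fun col => F col ++ [PySem.List.pyGetD col nr 0])) ++ l.map (pvRow F) := by
      simp [pvRow]
    rw [hre, ih (pre ++ [a]) hnd' (fun pr hpr => hl pr (by simp [hpr])) (fun pr hpr => hin pr (by simp [hpr]))]
    simp

-- one full pass of the main loop appends column nr's cell to every entry of the state
theorem pv_round (tab : List (String × List (String × List Int)))
    (hnd : (tab.map Prod.fst).Nodup) (hinner : ∀ pr ∈ tab, (pr.2.map Prod.fst).Nodup)
    (nr : Int) (F : List Int → List Int) :
    tab.foldl (fun acc2 pr =>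
        ((PySem.Dict.mk tab).getD pr.1 []).foldl (fun acc3 ar =>
          acc3.modify pr.1 PySem.Dict.empty (fun d => d.modify ar.1 []
            (fun l => l ++ [PySem.List.pyGetD ((PySem.Dict.mk ((PySem.Dict.mk tab).getD pr.1 [])).getD ar.1 []) nr 0]))) acc2)
      (pvState tab F)
      = pvState tab (fun col => F col ++ [PySem.List.pyGetD col nr 0]) := by
  have hl : ∀ pr ∈ tab, (PySem.Dict.mk tab).getD pr.1 [] = pr.2 := by
    intro pr hpr
    exact PySem.Dict.getD_of_mem_items _ (by simpa using hpr) (by simpa [PySem.Dict.keys_mk] using hnd) []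
  have h := pv_round_aux tab nr F tab [] (by simpa using hnd) hl hinner
  simpa [pvState] using h

-- the main loop over the enumerated reference row, by induction on the enumeration
theorem pv_main (tab : List (String × List (String × List Int)))
    (hnd : (tab.map Prod.fst).Nodup) (hinner : ∀ pr ∈ tab, (pr.2.map Prod.fst).Nodup)
    (es : List (Int × Int)) :
    ∀ (F G : List Int → List Int),
    es.foldl (fun acc ke =>
      tab.foldl (fun acc2 pr =>
        ((PySem.Dict.mk tab).getD pr.1 []).foldl (fun acc3 ar =>
          if ke.2 == 1 then
            (acc3.1.modify pr.1 PySem.Dict.empty (fun d => d.modify ar.1 [] (fun l => l ++ [PySem.List.pyGetD ((PySem.Dict.mk ((PySem.Dict.mk tab).getD pr.1 [])).getD ar.1 []) ke.1 0])), acc3.2)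
          else
            (acc3.1, acc3.2.modify pr.1 PySem.Dict.empty (fun d => d.modify ar.1 [] (fun l => l ++ [PySem.List.pyGetD ((PySem.Dict.mk ((PySem.Dict.mk tab).getD pr.1 [])).getD ar.1 []) ke.1 0])))) acc2) acc)
      (pvState tab F, pvState tab G)
      = (pvState tab (fun col => F col ++ ((es.filter (fun p => p.2 == 1)).map (fun p => PySem.List.pyGetD col p.1 0))),
         pvState tab (fun col => G col ++ ((es.filter (fun p => !(p.2 == 1))).map (fun p => PySem.List.pyGetD col p.1 0)))) := by
  induction es with
  | nil => intro F G; simp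
  | cons ke es ih =>
    intro F G
    rw [List.foldl_cons]
    by_cases hb : (ke.2 == 1) = true
    case pos =>
      have hfe : (fun (acc2 : PySem.Dict String (PySem.Dict String (List Int)) × PySem.Dict String (PySem.Dict String (List Int))) (pr : String × List (String × List Int)) =>
          ((PySem.Dict.mk tab).getD pr.1 []).foldl (fun acc3 ar =>
            if ke.2 == 1 then
              (acc3.1.modify pr.1 PySem.Dict.empty (fun d => d.modify ar.1 [] (fun l => l ++ [PySem.List.pyGetD ((PySem.Dict.mk ((PySem.Dict.mk tab).getD pr.1 [])).getD ar.1 []) ke.1 0])), acc3.2)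
            else
              (acc3.1, acc3.2.modify pr.1 PySem.Dict.empty (fun d => d.modify ar.1 [] (fun l => l ++ [PySem.List.pyGetD ((PySem.Dict.mk ((PySem.Dict.mk tab).getD pr.1 [])).getD ar.1 []) ke.1 0])))) acc2)
          = (fun acc2 pr =>
              (((PySem.Dict.mk tab).getD pr.1 []).foldl (fun acc3 ar =>
                acc3.modify pr.1 PySem.Dict.empty (fun d => d.modify ar.1 []
                  (fun l => l ++ [PySem.List.pyGetD ((PySem.Dict.mk ((PySem.Dict.mk tab).getD pr.1 [])).getD ar.1 []) ke.1 0]))) acc2.1,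
               acc2.2)) := by
        funext acc2 pr
        simp only [hb, if_true]
        rw [PySem.List.foldl_prod_mk
          (fun (d : PySem.Dict String (PySem.Dict String (List Int))) (ar : String × List Int) =>
            d.modify pr.1 PySem.Dict.empty (fun dd => dd.modify ar.1 []
              (fun l => l ++ [PySem.List.pyGetD ((PySem.Dict.mk ((PySem.Dict.mk tab).getD pr.1 [])).getD ar.1 []) ke.1 0])))
          (fun (d : PySem.Dict String (PySem.Dict String (List Int))) (_ : String × List Int) => d)]
        rw [List.foldl_fixed]
      rw [hfe, PySem.List.foldl_prod_mk
          (fun (a1 : PySem.Dict String (PySem.Dict String (List Int))) (pr : String × List (String × List Int)) =>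
            ((PySem.Dict.mk tab).getD pr.1 []).foldl (fun acc3 ar =>
              acc3.modify pr.1 PySem.Dict.empty (fun d => d.modify ar.1 []
                (fun l => l ++ [PySem.List.pyGetD ((PySem.Dict.mk ((PySem.Dict.mk tab).getD pr.1 [])).getD ar.1 []) ke.1 0]))) a1)
          (fun (a2 : PySem.Dict String (PySem.Dict String (List Int))) (_ : String × List (String × List Int)) => a2),
        List.foldl_fixed, pv_round tab hnd hinner ke.1 F,
        ih (fun col => F col ++ [PySem.List.pyGetD col ke.1 0]) G]
      have h1 : (fun col => (F col ++ [PySem.List.pyGetD col ke.1 0]) ++ ((es.filter (fun p => p.2 == 1)).map (fun p => PySem.List.pyGetD col p.1 0)))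
          = (fun col => F col ++ (((ke :: es).filter (fun p => p.2 == 1)).map (fun p => PySem.List.pyGetD col p.1 0))) := by
        funext col; simp [hb]
      have h2 : ((es.filter (fun p => !(p.2 == 1)))) = (((ke :: es).filter (fun p => !(p.2 == 1)))) := by
        simp [hb]
      rw [h1, ← h2]
    case neg =>
      rw [Bool.not_eq_true] at hb
      have hfe : (fun (acc2 : PySem.Dict String (PySem.Dict String (List Int)) × PySem.Dict String (PySem.Dict String (List Int))) (pr : String × List (String × List Int)) =>
          ((PySem.Dict.mk tab).getD pr.1 []).foldl (fun acc3 ar =>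
            if ke.2 == 1 then
              (acc3.1.modify pr.1 PySem.Dict.empty (fun d => d.modify ar.1 [] (fun l => l ++ [PySem.List.pyGetD ((PySem.Dict.mk ((PySem.Dict.mk tab).getD pr.1 [])).getD ar.1 []) ke.1 0])), acc3.2)
            else
              (acc3.1, acc3.2.modify pr.1 PySem.Dict.empty (fun d => d.modify ar.1 [] (fun l => l ++ [PySem.List.pyGetD ((PySem.Dict.mk ((PySem.Dict.mk tab).getD pr.1 [])).getD ar.1 []) ke.1 0])))) acc2)
          = (fun acc2 pr =>
              (acc2.1,
               ((PySem.Dict.mk tab).getD pr.1 []).foldl (fun acc3 ar =>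
                acc3.modify pr.1 PySem.Dict.empty (fun d => d.modify ar.1 []
                  (fun l => l ++ [PySem.List.pyGetD ((PySem.Dict.mk ((PySem.Dict.mk tab).getD pr.1 [])).getD ar.1 []) ke.1 0]))) acc2.2)) := by
        funext acc2 pr
        simp only [hb, Bool.false_eq_true, if_false]
        rw [PySem.List.foldl_prod_mk
          (fun (d : PySem.Dict String (PySem.Dict String (List Int))) (_ : String × List Int) => d)
          (fun (d : PySem.Dict String (PySem.Dict String (List Int))) (ar : String × List Int) =>
            d.modify pr.1 PySem.Dict.empty (fun dd => dd.modify ar.1 []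
              (fun l => l ++ [PySem.List.pyGetD ((PySem.Dict.mk ((PySem.Dict.mk tab).getD pr.1 [])).getD ar.1 []) ke.1 0])))]
        rw [List.foldl_fixed]
      rw [hfe, PySem.List.foldl_prod_mk
          (fun (a1 : PySem.Dict String (PySem.Dict String (List Int))) (_ : String × List (String × List Int)) => a1)
          (fun (a2 : PySem.Dict String (PySem.Dict String (List Int))) (pr : String × List (String × List Int)) =>
            ((PySem.Dict.mk tab).getD pr.1 []).foldl (fun acc3 ar =>
              acc3.modify pr.1 PySem.Dict.empty (fun d => d.modify ar.1 []
                (fun l => l ++ [PySem.List.pyGetD ((PySem.Dict.mk ((PySem.Dict.mk tab).getD pr.1 [])).getD ar.1 []) ke.1 0]))) a2),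
        List.foldl_fixed, pv_round tab hnd hinner ke.1 G,
        ih F (fun col => G col ++ [PySem.List.pyGetD col ke.1 0])]
      have h1 : (fun col => (G col ++ [PySem.List.pyGetD col ke.1 0]) ++ ((es.filter (fun p => !(p.2 == 1))).map (fun p => PySem.List.pyGetD col p.1 0)))
          = (fun col => G col ++ (((ke :: es).filter (fun p => !(p.2 == 1))).map (fun p => PySem.List.pyGetD col p.1 0))) := by
        funext col; simp [hb]
      have h2 : ((es.filter (fun p => p.2 == 1))) = (((ke :: es).filter (fun p => p.2 == 1))) := by
        simp [hb]
      rw [h1, ← h2]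

-- ===== VERDICT (by name: the statement is the Claim_ definition above) =====
theorem podzial_tab_spec : Claim_equal_podzial_tab := by
  intro tab przes_p atr_p _ hpre
  obtain ⟨hnd, hin, -, -, -⟩ := hpre
  unfold Spec_podzial_tab
  simp only [podzial_tab, podzial_tab_alt]
  rw [pv_skel tab hnd hin, pv_main tab hnd hin _ (fun _ => []) (fun _ => [])]
  simp [pvState, pvRow, List.map_map, Function.comp]
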